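-- pv_equiv track=rewrite | github.com/mukund302002/RAG-proco-chatbot | backend/model.py | split_text_and_embeddings
-- ===== SOURCE A (Python) =====
-- def split_text_and_embeddings(words, embeddings, max_chunk_size):
--     """
--     Split the text and embeddings into chunks.
--
--     Args:
--     words (list): The list of words to be split into chunks.
--     embeddings (list): The list of embeddings to be split into corresponding chunks.
--     max_chunk_size (int): The maximum size of each chunk.
--
--     Returns:
--     list of str: List of text chunks.
--     list of list: List of corresponding embeddings for each chunk.
--     """
--     chunks = []
--     chunk_embeddings = []
--     current_chunk = []
--     current_embeddings = []
--
--     for idx, word in enumerate(words):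
--         current_chunk.append(word)
--         current_embeddings.append(embeddings[idx])
--
--         if len(" ".join(current_chunk)) >= max_chunk_size:
--             chunks.append(" ".join(current_chunk))
--             chunk_embeddings.append(current_embeddings)
--             current_chunk = []
--             current_embeddings = []
--
--     if current_chunk:
--         chunks.append(" ".join(current_chunk))
--         chunk_embeddings.append(current_embeddings)
--
--     return chunks, chunk_embeddings
-- ===== SOURCE B (Python) =====
-- def split_text_and_embeddings(words, embeddings, max_chunk_size):
--     # Pass 1: find chunk boundaries by tracking the joined length incrementally.
--     bounds = []
--     start = 0
--     cur_len = 0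
--     for i, w in enumerate(words):
--         cur_len = len(w) if i == start else cur_len + 1 + len(w)
--         if cur_len >= max_chunk_size:
--             bounds.append((start, i + 1))
--             start = i + 1
--     if start < len(words):
--         bounds.append((start, len(words)))
--     # Pass 2: materialise chunks and embedding groups from the boundary pairs.
--     chunks = [" ".join(words[s:e]) for (s, e) in bounds]
--     chunk_embeddings = [embeddings[s:e] for (s, e) in bounds]
--     return chunks, chunk_embeddings
-- ===== Notes on version B (the rewrite author's own statement) =====
-- stated objective: faster
-- what changed: A builds chunks by accumulating word and embedding lists and re-joining the growing chunk on every iteration; B first computes (start,end) boundary index pairs in one pass tracking the joined length incrementally, then assembles each chunk and its embedding group from the boundary pairs by join/slice.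
import Mathlib
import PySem

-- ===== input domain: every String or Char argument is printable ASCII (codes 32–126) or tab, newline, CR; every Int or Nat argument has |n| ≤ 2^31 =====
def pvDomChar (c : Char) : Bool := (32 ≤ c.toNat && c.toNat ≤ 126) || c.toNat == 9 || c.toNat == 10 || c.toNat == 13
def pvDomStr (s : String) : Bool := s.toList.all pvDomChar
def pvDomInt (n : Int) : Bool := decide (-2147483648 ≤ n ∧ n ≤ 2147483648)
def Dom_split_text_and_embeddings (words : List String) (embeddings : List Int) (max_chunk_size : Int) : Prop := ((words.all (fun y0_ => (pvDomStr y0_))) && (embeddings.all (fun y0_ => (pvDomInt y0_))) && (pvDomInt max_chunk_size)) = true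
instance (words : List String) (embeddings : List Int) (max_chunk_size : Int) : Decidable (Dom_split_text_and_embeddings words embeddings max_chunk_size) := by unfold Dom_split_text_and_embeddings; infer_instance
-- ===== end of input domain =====

-- B replaces A's accumulate-and-rejoin loop (which re-joins the growing chunk every iteration) by a boundary-index first pass tracking the joined length incrementally, plus a join/slice assembly pass (faster).

-- ===== PORT A =====
-- A's loop: state (chunks, chunk_embeddings, current_chunk, current_embeddings), index idx.
-- embeddings[idx] is pyGetD (IndexError = out of range, excluded by Pre_).
def pvALoop (embeddings : List Int) (max_chunk_size : Int) :
    List String → Nat → (List String × List (List Int) × List String × List Int) →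
    (List String × List (List Int) × List String × List Int)
  | [], _, st => st
  | w :: ws, idx, (chunks, cemb, cur, cure) =>
    let cur' := cur ++ [w]
    let cure' := cure ++ [PySem.List.pyGetD embeddings (idx : Int) 0]
    if max_chunk_size ≤ PySem.Str.len (PySem.Str.join " " cur') then
      pvALoop embeddings max_chunk_size ws (idx + 1)
        (chunks ++ [PySem.Str.join " " cur'], cemb ++ [cure'], [], [])
    else
      pvALoop embeddings max_chunk_size ws (idx + 1) (chunks, cemb, cur', cure')

def split_text_and_embeddings (words : List String) (embeddings : List Int) (max_chunk_size : Int) : List String × List (List Int) :=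
  match pvALoop embeddings max_chunk_size words 0 ([], [], [], []) with
  | (chunks, cemb, cur, cure) =>
    if cur ≠ [] then (chunks ++ [PySem.Str.join " " cur], cemb ++ [cure])
    else (chunks, cemb)

-- ===== PORT B =====
-- B's first pass: state (bounds, start, cur_len), index i; records (start, end) boundary pairs.
def pvBLoop (max_chunk_size : Int) :
    List String → Nat → (List (Nat × Nat) × Nat × Int) → (List (Nat × Nat) × Nat × Int)
  | [], _, st => st
  | w :: ws, i, (bounds, start, curLen) =>
    let curLen' := if i == start then PySem.Str.len w else curLen + 1 + PySem.Str.len w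
    if max_chunk_size ≤ curLen' then
      pvBLoop max_chunk_size ws (i + 1) (bounds ++ [(start, i + 1)], i + 1, curLen')
    else
      pvBLoop max_chunk_size ws (i + 1) (bounds, start, curLen')

def split_text_and_embeddings_alt (words : List String) (embeddings : List Int) (max_chunk_size : Int) : List String × List (List Int) :=
  match pvBLoop max_chunk_size words 0 ([], 0, 0) with
  | (bounds, start, _) =>
    let bounds' := if start < words.length then bounds ++ [(start, words.length)] else bounds
    (bounds'.map (fun p => PySem.Str.join " " (PySem.List.slice words (some (p.1 : Int)) (some (p.2 : Int)))),
     bounds'.map (fun p => PySem.List.slice embeddings (some (p.1 : Int)) (some (p.2 : Int))))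

-- ===== PRECONDITION & SPEC =====
-- Pre_ excludes exactly the inputs where A raises IndexError (embeddings shorter than words).
def Pre_split_text_and_embeddings (words : List String) (embeddings : List Int) (max_chunk_size : Int) : Prop :=
  words.length ≤ embeddings.length
instance (words : List String) (embeddings : List Int) (max_chunk_size : Int) : Decidable (Pre_split_text_and_embeddings words embeddings max_chunk_size) := by unfold Pre_split_text_and_embeddings; infer_instance

def pvWitness_split_text_and_embeddings : List String × List Int × Int := (["ab", "c", "de"], [1, 2, 3], 4)

def Spec_split_text_and_embeddings (words : List String) (embeddings : List Int) (max_chunk_size : Int) (out : List String × List (List Int)) : Prop := out = split_text_and_embeddings_alt words embeddings max_chunk_size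
instance (words : List String) (embeddings : List Int) (max_chunk_size : Int) (out : List String × List (List Int)) : Decidable (Spec_split_text_and_embeddings words embeddings max_chunk_size out) := by unfold Spec_split_text_and_embeddings; infer_instance

-- ===== CLAIM (what is proved, stated in full; the proofs are below) =====
def Claim_equal_split_text_and_embeddings : Prop := ∀ (words : List String) (embeddings : List Int) (max_chunk_size : Int), Dom_split_text_and_embeddings words embeddings max_chunk_size → Pre_split_text_and_embeddings words embeddings max_chunk_size → Spec_split_text_and_embeddings words embeddings max_chunk_size (split_text_and_embeddings words embeddings max_chunk_size)


-- ===== LEMMAS AND PROOFS =====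

-- proof-side helpers (used only by the proofs below)
def pvFw (W : List String) (p : Nat × Nat) : String :=
  PySem.Str.join " " (PySem.List.slice W (some (p.1 : Int)) (some (p.2 : Int)))
def pvFe (E : List Int) (p : Nat × Nat) : List Int :=
  PySem.List.slice E (some (p.1 : Int)) (some (p.2 : Int))
def pvFinA (st : List String × List (List Int) × List String × List Int) : List String × List (List Int) :=
  match st with
  | (chunks, cemb, cur, cure) =>
    if cur ≠ [] then (chunks ++ [PySem.Str.join " " cur], cemb ++ [cure])
    else (chunks, cemb)
def pvFinB (W : List String) (E : List Int) (st : List (Nat × Nat) × Nat × Int) : List String × List (List Int) :=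
  match st with
  | (bounds, start, _) =>
    let bounds' := if start < W.length then bounds ++ [(start, W.length)] else bounds
    (bounds'.map (pvFw W), bounds'.map (pvFe E))

theorem pvA_eq (W : List String) (E : List Int) (m : Int) :
    split_text_and_embeddings W E m = pvFinA (pvALoop E m W 0 ([], [], [], [])) := rfl
theorem pvB_eq (W : List String) (E : List Int) (m : Int) :
    split_text_and_embeddings_alt W E m = pvFinB W E (pvBLoop m W 0 ([], 0, 0)) := rfl

theorem pvJoin_append (sep w : List Char) (l : List (List Char)) (h : l ≠ []) :
    PySem.Chars.join sep (l ++ [w]) = PySem.Chars.join sep l ++ sep ++ w := by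
  induction l with
  | nil => exact absurd rfl h
  | cons a t ih =>
    cases t with
    | nil => simp [PySem.Chars.join_cons_cons, PySem.Chars.join_singleton]
    | cons b t' =>
      have ih' := ih (by simp)
      simp only [List.cons_append] at ih' ⊢
      rw [PySem.Chars.join_cons_cons, PySem.Chars.join_cons_cons, ih']
      simp

theorem pvLenJoin_append (l : List String) (w : String) (h : l ≠ []) :
    PySem.Str.len (PySem.Str.join " " (l ++ [w])) =
      PySem.Str.len (PySem.Str.join " " l) + 1 + PySem.Str.len w := by
  rw [PySem.Str.len_eq, PySem.Str.len_eq, PySem.Str.len_eq, PySem.Str.toList_join, PySem.Str.toList_join]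
  rw [List.map_append, List.map_singleton, pvJoin_append _ _ _ (by simpa using h)]
  simp; omega

theorem pvJoin_single (w : String) : PySem.Str.join " " [w] = w := by
  simp [PySem.Str.join]

theorem pvKey (E : List Int) (m : Int) (W : List String) (hWE : W.length ≤ E.length) :
    ∀ (ws : List String) (i : Nat) (bounds : List (Nat × Nat)) (start : Nat) (clen : Int),
    ws = W.drop i → start ≤ i → i ≤ W.length →
    (start < i → clen = PySem.Str.len (PySem.Str.join " " ((W.drop start).take (i - start)))) →
    pvFinA (pvALoop E m ws i (bounds.map (pvFw W), bounds.map (pvFe E),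
        (W.drop start).take (i - start), (E.drop start).take (i - start)))
      = pvFinB W E (pvBLoop m ws i (bounds, start, clen)) := by
  intro ws
  induction ws with
  | nil =>
    intro i bounds start clen hws hsi hiW hclen
    have hi : i = W.length := by
      have := List.drop_eq_nil_iff.mp hws.symm
      omega
    subst hi
    simp only [pvALoop, pvBLoop, pvFinA, pvFinB]
    by_cases hs : start < W.length
    · have hne : (W.drop start).take (W.length - start) ≠ [] := by
        intro hnil
        have := congrArg List.length hnil
        simp [List.length_take, List.length_drop] at this
        omega
      rw [if_pos hne, if_pos hs]
      simp only [List.map_append, List.map_singleton]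
      have e1 : pvFw W (start, W.length) = PySem.Str.join " " ((W.drop start).take (W.length - start)) := by
        simp only [pvFw]
        rw [PySem.List.slice_natCast]
      have e2 : pvFe E (start, W.length) = (E.drop start).take (W.length - start) := by
        simp only [pvFe]
        rw [PySem.List.slice_natCast]
      rw [e1, e2]
    · have hse : start = W.length := by omega
      subst hse
      simp
  | cons w ws ih =>
    intro i bounds start clen hws hsi hiW hclen
    have hiw : i < W.length := by
      by_contra hge
      rw [List.drop_eq_nil_iff.mpr (by omega)] at hws
      exact absurd hws (by simp)
    have hwi : W[i]? = some w := by
      have : (W.drop i)[0]? = some w := by rw [← hws]; rfl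
      simpa using this
    have hws' : ws = W.drop (i + 1) := by
      rw [← List.tail_drop, ← hws, List.tail_cons]
    -- the appended chunk word list
    have hcur' : (W.drop start).take (i - start) ++ [w] = (W.drop start).take (i + 1 - start) := by
      have h1 : i + 1 - start = (i - start) + 1 := by omega
      rw [h1, List.take_add_one]
      congr 1
      rw [List.getElem?_drop]
      have : start + (i - start) = i := by omega
      rw [this, hwi]
      rfl
    have hE : PySem.List.pyGetD E (i : Int) 0 = E.getD i 0 := PySem.List.pyGetD_natCast E i 0
    have hcure' : (E.drop start).take (i - start) ++ [PySem.List.pyGetD E (i : Int) 0]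
        = (E.drop start).take (i + 1 - start) := by
      have h1 : i + 1 - start = (i - start) + 1 := by omega
      rw [h1, List.take_add_one]
      congr 1
      rw [List.getElem?_drop, hE]
      have h2 : start + (i - start) = i := by omega
      rw [h2]
      rw [List.getD_eq_getElem _ _ (by omega)]
      rw [List.getElem?_eq_getElem (by omega)]
      rfl
    -- length bookkeeping
    have hlen : PySem.Str.len (PySem.Str.join " " ((W.drop start).take (i - start) ++ [w]))
        = (if (i == start) = true then PySem.Str.len w else clen + 1 + PySem.Str.len w) := by
      by_cases his : i = start
      · subst his
        simp [pvJoin_single]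
      · have hlt : start < i := by omega
        have hne : (W.drop start).take (i - start) ≠ [] := by
          intro hnil
          have := congrArg List.length hnil
          simp [List.length_take, List.length_drop] at this
          omega
        rw [pvLenJoin_append _ _ hne, ← hclen hlt]
        simp [his]
    simp only [pvALoop, pvBLoop]
    rw [hlen, hcure', hcur']
    by_cases hc : m ≤ (if (i == start) = true then PySem.Str.len w else clen + 1 + PySem.Str.len w)
    · rw [if_pos hc, if_pos hc]
      have hcast : ((i + 1 : Nat) : Int) = (i : Int) + 1 := by push_cast; ring
      have h1 : bounds.map (pvFw W) ++ [PySem.Str.join " " ((W.drop start).take (i + 1 - start))]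
          = (bounds ++ [(start, i + 1)]).map (pvFw W) := by
        simp only [List.map_append, List.map_singleton, pvFw]
        rw [PySem.List.slice_natCast]
      have h2 : bounds.map (pvFe E) ++ [(E.drop start).take (i + 1 - start)]
          = (bounds ++ [(start, i + 1)]).map (pvFe E) := by
        simp only [List.map_append, List.map_singleton, pvFe]
        rw [PySem.List.slice_natCast]
      rw [h1, h2]
      have := ih (i + 1) (bounds ++ [(start, i + 1)]) (i + 1)
        (if (i == start) = true then PySem.Str.len w else clen + 1 + PySem.Str.len w)
        hws' (by omega) (by omega) (by omega)
      simpa using this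
    · rw [if_neg hc, if_neg hc]
      have := ih (i + 1) bounds start
        (if (i == start) = true then PySem.Str.len w else clen + 1 + PySem.Str.len w)
        hws' (by omega) (by omega)
        (fun _ => by rw [← hcur', ← hlen])
      simpa using this


-- ===== VERDICT (by name: the statement is the Claim_ definition above) =====
theorem split_text_and_embeddings_spec : Claim_equal_split_text_and_embeddings := by
  intro W E m _ hpre
  unfold Spec_split_text_and_embeddings
  unfold Pre_split_text_and_embeddings at hpre
  rw [pvA_eq, pvB_eq]
  have := pvKey E m W hpre W 0 [] 0 0 (by simp) (le_refl 0) (by omega) (by omega)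
  simpa using this
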